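-- pv_equiv track=rewrite | github.com/FFilipLee/discrete_mathematics | lab3/goodstein.py | goodstein_sequence
-- ===== SOURCE A (Python) =====
-- def to_hereditary_base(n, base):
--     if n == 0:
--         return []
--     e = 0
--     power = 1
--     next_power = power * base
--     while next_power <= n:
--         e += 1
--         power = next_power
--         next_power = power * base
--     c = n // power
--     remainder = n % power
--     rep_e = to_hereditary_base(e, base)
--     rep_rem = to_hereditary_base(remainder, base)
--     return [(c, rep_e)] + rep_rem
--
-- def eval_hereditary(rep, base):
--     total = 0
--     for coef, exp_rep in rep:
--         exp_val = eval_hereditary(exp_rep, base)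
--         total += coef * (base ** exp_val)
--     return total
--
-- def goodstein_sequence(start, max_terms=1000):
--     if start == 0:
--         return [0]
--     sequence = [start]
--     current = start
--     b = 2
--     while current > 0 and len(sequence) < max_terms:
--         rep = to_hereditary_base(current, b)
--         next_val = eval_hereditary(rep, b + 1)
--         current = next_val - 1
--         sequence.append(current)
--         b += 1
--     return sequence
-- ===== SOURCE B (Python) =====
-- def _val(n, b, c):
--     # value of n, written hereditarily in base b, evaluated at base c:
--     # peel base-b digits from the least significant end; the digit at
--     # position i contributes digit * c ** _val(i, b, c).
--     total = 0
--     i = 0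
--     while n > 0:
--         d = n % b
--         if d:
--             total += d * c ** _val(i, b, c)
--         n //= b
--         i += 1
--     return total
--
-- def goodstein_sequence(start, max_terms=1000):
--     if start == 0:
--         return [0]
--     tail = []
--     current = start
--     b = 2
--     remaining = max_terms - 1
--     while current > 0 and remaining > 0:
--         current = _val(current, b, b + 1) - 1
--         tail.append(current)
--         b += 1
--         remaining -= 1
--     return [start] + tail
-- ===== Notes on version B (the rewrite author's own statement) =====
-- stated objective: alternative
-- what changed: A builds a nested list-of-tuples hereditary representation via a largest-power search and then evaluates it with a second recursive helper; B uses a single recursion that peels base-b digits from the least significant end (n % b, n //= b), each digit at position i contributing digit * new_base ** value-of-i, so no representation and no largest-power search exist.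
import Mathlib
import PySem

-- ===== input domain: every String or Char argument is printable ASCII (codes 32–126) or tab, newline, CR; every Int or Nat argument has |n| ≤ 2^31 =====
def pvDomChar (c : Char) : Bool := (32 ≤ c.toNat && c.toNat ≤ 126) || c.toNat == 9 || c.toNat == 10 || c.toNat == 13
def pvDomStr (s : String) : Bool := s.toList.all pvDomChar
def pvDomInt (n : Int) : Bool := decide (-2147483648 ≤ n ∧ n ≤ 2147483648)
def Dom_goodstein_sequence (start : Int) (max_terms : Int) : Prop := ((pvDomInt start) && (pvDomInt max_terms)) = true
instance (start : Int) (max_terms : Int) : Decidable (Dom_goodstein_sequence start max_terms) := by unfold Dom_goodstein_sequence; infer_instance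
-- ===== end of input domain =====

-- B replaces A's pair of helpers (build a nested list-of-tuples hereditary representation
-- via a largest-power search, then evaluate it) by a single recursion that peels base-b
-- digits from the least significant end, each digit d at position i contributing
-- d * c ^ value-of-i; no representation and no largest-power search exist in B.
-- Objective: alternative decomposition (same asymptotic cost).
-- All helper arithmetic runs on Nat: both Pythons reach the helpers only with current > 0
-- and base ≥ 2, where this is exact.

-- ===== PORT A =====

-- the nested list-of-pairs representation [(c, rep_e)] + rep_rem, as a flat inductive
inductive HRep : Type
  | nil : HRep
  | node : Nat → HRep → HRep → HRep   -- coefficient, exponent rep, rest of the list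
deriving DecidableEq, Repr

-- A's inner while-loop: while power*base <= n: e += 1; power *= base.
-- The extra conjuncts 2 ≤ base / 1 ≤ power are totality guards only; the loop is only
-- reached with base ≥ 2 and power = 1, where they always hold.
def findPow (n base e power : Nat) : Nat × Nat :=
  if hc : 2 ≤ base ∧ 1 ≤ power ∧ power * base ≤ n then
    findPow n base (e + 1) (power * base)
  else
    (e, power)
termination_by n + 1 - power
decreasing_by
  have h2 : power + 1 ≤ power * base := by nlinarith [hc.1, hc.2.1]
  omega

-- to_hereditary_base; 'fuel' bounds the recursion depth (the recursion is on big values,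
-- not structurally decreasing); it is always called with fuel = n, which suffices since
-- both recursive Python calls are on values < n.
def toHB (fuel : Nat) (n : Nat) (base : Nat) : HRep :=
  match fuel with
  | 0 => .nil
  | fuel + 1 =>
    if n = 0 then .nil
    else
      let ep := findPow n base 0 1
      .node (n / ep.2) (toHB fuel ep.1 base) (toHB fuel (n % ep.2) base)

-- eval_hereditary: the for-loop accumulation of coef * base ** eval(exp_rep)
def evalH (rep : HRep) (base : Nat) : Nat :=
  match rep with
  | .nil => 0
  | .node c er rest => c * base ^ (evalH er base) + evalH rest base

-- A's main while-loop; 'remaining' = max_terms - len(sequence) (one element is appended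
-- per iteration, so this counts the iterations allowed by len(sequence) < max_terms);
-- 'seq' is the growing sequence list.
def gsLoopA (remaining : Nat) (current : Int) (b : Nat) (seq : List Int) : List Int :=
  match remaining with
  | 0 => seq
  | r + 1 =>
    if current > 0 then
      let next : Int := Int.ofNat (evalH (toHB current.toNat current.toNat b) (b + 1))
      gsLoopA r (next - 1) (b + 1) (seq ++ [next - 1])
    else seq

def goodstein_sequence (start : Int) (max_terms : Int) : List Int :=
  if start = 0 then [0]
  else gsLoopA (max_terms - 1).toNat start 2 [start]

-- ===== PORT B =====

-- _val(n, b, c): the digit-peeling while-loop (total/i are the loop state) and the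
-- recursive call on the position index i, mutually recursive through the same fuel;
-- the 2 ≤ b conjunct in the guard is a totality guard only (b ≥ 2 at every call).
mutual
def valB (fuel : Nat) (n : Nat) (b : Nat) (c : Nat) : Nat :=
  match fuel with
  | 0 => 0
  | f + 1 => valLoop f n b c 0 0
termination_by (fuel, 0)

def valLoop (f : Nat) (n : Nat) (b : Nat) (c : Nat) (i : Nat) (total : Nat) : Nat :=
  if h : 2 ≤ b ∧ 0 < n then
    valLoop f (n / b) b c (i + 1)
      (if n % b = 0 then total else total + (n % b) * c ^ valB f i b c)
  else total
termination_by (f, n + 1)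
decreasing_by
  · exact Prod.Lex.right f (by omega)
  · exact Prod.Lex.right f (by have := Nat.div_lt_self h.2 (by omega : 1 < b); omega)
end

-- B's main while-loop over 'remaining'; 'tail' collects the terms after start.
def gsLoopB (remaining : Nat) (current : Int) (b : Nat) (tail : List Int) : List Int :=
  match remaining with
  | 0 => tail
  | r + 1 =>
    if current > 0 then
      let cur : Int := Int.ofNat (valB current.toNat current.toNat b (b + 1)) - 1
      gsLoopB r cur (b + 1) (tail ++ [cur])
    else tail

def goodstein_sequence_alt (start : Int) (max_terms : Int) : List Int :=
  if start = 0 then [0]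
  else start :: gsLoopB (max_terms - 1).toNat start 2 []

-- ===== PRECONDITION & SPEC =====
def Spec_goodstein_sequence (start : Int) (max_terms : Int) (out : List Int) : Prop := out = goodstein_sequence_alt start max_terms
instance (start : Int) (max_terms : Int) (out : List Int) : Decidable (Spec_goodstein_sequence start max_terms out) := by unfold Spec_goodstein_sequence; infer_instance

-- ===== CLAIM (what is proved, stated in full; the proofs are below) =====
def Claim_equal_goodstein_sequence : Prop := ∀ (start : Int) (max_terms : Int), Dom_goodstein_sequence start max_terms → Spec_goodstein_sequence start max_terms (goodstein_sequence start max_terms)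

-- ===== LEMMAS AND PROOFS =====

-- findPow's output: the largest power of b not exceeding n, with its exponent
theorem findPow_spec (n base : Nat) (hb : 2 ≤ base) (e power : Nat) (hp : power = base ^ e)
    (hn : power ≤ n) :
    (findPow n base e power).2 = base ^ (findPow n base e power).1 ∧
    (findPow n base e power).2 ≤ n ∧ n < (findPow n base e power).2 * base := by
  induction e, power using findPow.induct n base with
  | case1 e power hc ih =>
    rw [findPow, dif_pos hc]
    exact ih (by rw [hp, pow_succ]) hc.2.2
  | case2 e power hc =>
    rw [findPow, dif_neg hc]
    show power = base ^ e ∧ power ≤ n ∧ n < power * base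
    have h1 : 1 ≤ power := hp ▸ Nat.one_le_pow _ _ (by omega)
    have : ¬ power * base ≤ n := by tauto
    exact ⟨hp, hn, by omega⟩

-- …hence findPow from (0,1) is determined by the bracketing b^E ≤ n < b^(E+1)
theorem findPow_eq (n base E : Nat) (hb : 2 ≤ base)
    (h1 : base ^ E ≤ n) (h2 : n < base ^ (E + 1)) :
    findPow n base 0 1 = (E, base ^ E) := by
  obtain ⟨hpow, hle, hlt⟩ :=
    findPow_spec n base hb 0 1 (by simp) (le_trans (Nat.one_le_pow _ _ (by omega)) h1)
  set e := (findPow n base 0 1).1 with he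
  rw [hpow] at hle hlt
  rw [← pow_succ] at hlt
  have hEe : E = e := by
    by_contra hne
    rcases Nat.lt_or_ge E e with h | h
    · have : base ^ (E + 1) ≤ base ^ e := Nat.pow_le_pow_right (by omega) (by omega)
      omega
    · have : base ^ (e + 1) ≤ base ^ E := Nat.pow_le_pow_right (by omega) (by omega)
      omega
  have : (findPow n base 0 1).2 = base ^ E := by rw [hpow, hEe]
  exact Prod.ext (hEe.symm) this

-- the clean common value: n written hereditarily in base b, evaluated at c
def hVal (b c : Nat) (n : Nat) : Nat :=
  if h : 2 ≤ b ∧ 0 < n then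
    let ep := findPow n b 0 1
    (n / ep.2) * c ^ hVal b c ep.1 + hVal b c (n % ep.2)
  else 0
termination_by n
decreasing_by
  · obtain ⟨hpow, hle, hlt⟩ := findPow_spec n b h.1 0 1 (by simp) (by omega)
    have h2 : (findPow n b 0 1).1 < 2 ^ (findPow n b 0 1).1 := Nat.lt_two_pow_self
    have h3 : 2 ^ (findPow n b 0 1).1 ≤ b ^ (findPow n b 0 1).1 :=
      Nat.pow_le_pow_left h.1 _
    omega
  · obtain ⟨hpow, hle, hlt⟩ := findPow_spec n b h.1 0 1 (by simp) (by omega)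
    have h1 : 1 ≤ (findPow n b 0 1).2 := hpow ▸ Nat.one_le_pow _ _ (by omega)
    have := Nat.mod_lt n (show 0 < (findPow n b 0 1).2 by omega)
    omega

theorem hVal_zero (b c : Nat) : hVal b c 0 = 0 := by rw [hVal]; simp

-- the unfolding of hVal on a positive input, as an equation
theorem hVal_pos (b c n : Nat) (hb : 2 ≤ b) (hn : 0 < n) :
    hVal b c n = (n / (findPow n b 0 1).2) * c ^ hVal b c (findPow n b 0 1).1 +
      hVal b c (n % (findPow n b 0 1).2) := by
  rw [hVal, dif_pos ⟨hb, hn⟩]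

-- the exponent and the remainder findPow yields are smaller than n (for the recursions)
theorem findPow_lt (n b : Nat) (hb : 2 ≤ b) (hn : 0 < n) :
    (findPow n b 0 1).1 < n ∧ n % (findPow n b 0 1).2 < n ∧
    (findPow n b 0 1).2 = b ^ (findPow n b 0 1).1 ∧ (findPow n b 0 1).2 ≤ n ∧
    n < (findPow n b 0 1).2 * b := by
  obtain ⟨hpow, hle, hlt⟩ := findPow_spec n b hb 0 1 (by simp) (by omega)
  have h2 : (findPow n b 0 1).1 < 2 ^ (findPow n b 0 1).1 := Nat.lt_two_pow_self
  have h3 : 2 ^ (findPow n b 0 1).1 ≤ b ^ (findPow n b 0 1).1 := Nat.pow_le_pow_left hb _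
  have h1 : 1 ≤ (findPow n b 0 1).2 := hpow ▸ Nat.one_le_pow _ _ (by omega)
  have := Nat.mod_lt n (show 0 < (findPow n b 0 1).2 by omega)
  exact ⟨by omega, by omega, hpow, hle, hlt⟩

-- A's helpers compute hVal (with enough fuel)
theorem eval_toHB (b c : Nat) (hb : 2 ≤ b) :
    ∀ fuel n, n ≤ fuel → evalH (toHB fuel n b) c = hVal b c n := by
  intro fuel
  induction fuel with
  | zero =>
    intro n hn
    have : n = 0 := by omega
    simp [this, toHB, evalH, hVal_zero]
  | succ f ih =>
    intro n hn
    by_cases h0 : n = 0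
    · simp [h0, toHB, evalH, hVal_zero]
    · have hpos : 0 < n := by omega
      obtain ⟨hexp, hrem, -, -, -⟩ := findPow_lt n b hb hpos
      rw [toHB, if_neg h0]
      show evalH (.node _ _ _) c = _
      rw [evalH, ih _ (by omega), ih _ (by omega), hVal_pos b c n hb hpos]

-- splitting off the low-order digits: hVal is additive across a digit boundary
theorem hVal_split (b c : Nat) (hb : 2 ≤ b) :
    ∀ q e r, r < b ^ e → hVal b c (q * b ^ e + r) = hVal b c (q * b ^ e) + hVal b c r := by
  intro q
  induction q using Nat.strong_induction_on with
  | _ q ih =>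
    intro e r hr
    by_cases hq : q = 0
    · simp [hq, hVal_zero]
    · have hq1 : 1 ≤ q := by omega
      -- top exponent of q, from findPow on q
      obtain ⟨-, -, hpow, hle, hlt⟩ := findPow_lt q b hb (by omega)
      set e₁ := (findPow q b 0 1).1 with he₁
      rw [hpow] at hle hlt
      have hq_lo : b ^ e₁ ≤ q := hle
      have hq_hi : q < b ^ (e₁ + 1) := by rw [pow_succ]; omega
      have hbp : 0 < b ^ e := Nat.pow_pos (by omega)
      have hbp1 : 0 < b ^ e₁ := Nat.pow_pos (by omega)
      -- the top exponent of both n := q*b^e + r and q*b^e is e + e₁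
      have hE_lo : b ^ (e + e₁) ≤ q * b ^ e := by
        rw [pow_add]
        nlinarith
      have hE_hi : q * b ^ e + r < b ^ (e + e₁ + 1) := by
        have h1 : q + 1 ≤ b ^ (e₁ + 1) := hq_hi
        have h3 : (q + 1) * b ^ e ≤ b ^ (e₁ + 1) * b ^ e := Nat.mul_le_mul_right _ h1
        have h2 : b ^ (e₁ + 1) * b ^ e = b ^ (e + e₁ + 1) := by
          rw [← pow_add]; ring_nf
        nlinarith
      have hfp_n : findPow (q * b ^ e + r) b 0 1 = (e + e₁, b ^ (e + e₁)) :=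
        findPow_eq _ _ _ hb (by omega) hE_hi
      have hfp_q : findPow (q * b ^ e) b 0 1 = (e + e₁, b ^ (e + e₁)) :=
        findPow_eq _ _ _ hb hE_lo (by omega)
      -- div/mod of n and q*b^e by b^(e+e₁)
      have hqsplit : q = q / b ^ e₁ * b ^ e₁ + q % b ^ e₁ := (by rw [mul_comm, Nat.div_add_mod])
      have hmod_lt : q % b ^ e₁ < b ^ e₁ := Nat.mod_lt _ (by omega)
      have hEeq : b ^ (e + e₁) = b ^ e₁ * b ^ e := by rw [← pow_add]; ring_nf
      have hlow : ∀ s, s ≤ r → q % b ^ e₁ * b ^ e + s < b ^ (e + e₁) := by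
        intro s hs
        have h4 : (q % b ^ e₁ + 1) * b ^ e ≤ b ^ e₁ * b ^ e :=
          Nat.mul_le_mul_right _ (by omega)
        nlinarith
      have hn_decomp : ∀ s, q * b ^ e + s = q / b ^ e₁ * b ^ (e + e₁) + (q % b ^ e₁ * b ^ e + s) := by
        intro s
        calc q * b ^ e + s = (q / b ^ e₁ * b ^ e₁ + q % b ^ e₁) * b ^ e + s := by rw [← hqsplit]
        _ = q / b ^ e₁ * (b ^ e₁ * b ^ e) + (q % b ^ e₁ * b ^ e + s) := by ring
        _ = _ := by rw [← hEeq]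
      have hdiv : ∀ s, s ≤ r → (q * b ^ e + s) / b ^ (e + e₁) = q / b ^ e₁ := by
        intro s hs
        rw [hn_decomp s, mul_comm (q / b ^ e₁) (b ^ (e + e₁)),
          Nat.mul_add_div (by positivity), Nat.div_eq_of_lt (hlow s hs)]
        omega
      have hmod : ∀ s, s ≤ r → (q * b ^ e + s) % b ^ (e + e₁) = q % b ^ e₁ * b ^ e + s := by
        intro s hs
        conv_lhs => rw [hn_decomp s, mul_comm (q / b ^ e₁) (b ^ (e + e₁))]
        rw [Nat.mul_add_mod]
        exact Nat.mod_eq_of_lt (hlow s hs)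
      -- inductive hypothesis on the low part
      have hih : hVal b c (q % b ^ e₁ * b ^ e + r) =
          hVal b c (q % b ^ e₁ * b ^ e) + hVal b c r :=
        ih (q % b ^ e₁) (by omega) e r hr
      have hpos_n : 0 < q * b ^ e + r := by positivity
      have hpos_q : 0 < q * b ^ e := by positivity
      rw [hVal_pos b c _ hb hpos_n, hVal_pos b c _ hb hpos_q]
      have hq0 := hdiv 0 (by omega)
      have hm0 := hmod 0 (by omega)
      simp only [Nat.add_zero] at hq0 hm0
      simp only [hfp_n, hfp_q]
      rw [hdiv r (le_refl r), hmod r (le_refl r), hq0, hm0, hih]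
      ring

-- a single digit d < b at position i contributes d * c ^ hVal i
theorem hVal_digit (b c : Nat) (hb : 2 ≤ b) (d i : Nat) (hd : d < b) :
    hVal b c (d * b ^ i) = d * c ^ hVal b c i := by
  by_cases h0 : d = 0
  · simp [h0, hVal_zero]
  · have hbp : 0 < b ^ i := Nat.pow_pos (by omega)
    have h1 : b ^ i ≤ d * b ^ i := Nat.le_mul_of_pos_left _ (by omega)
    have h2 : d * b ^ i < b ^ (i + 1) := by rw [pow_succ, mul_comm (b ^ i) b]; nlinarith
    have hfp : findPow (d * b ^ i) b 0 1 = (i, b ^ i) := findPow_eq _ _ _ hb h1 h2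
    rw [hVal_pos b c _ hb (by positivity)]
    simp only [hfp]
    rw [Nat.mul_div_cancel _ hbp, Nat.mul_mod_left, hVal_zero]
    omega

-- B's digit loop computes hVal of the digits it still has to process, shifted by b^i
theorem valLoop_eq (b c : Nat) (hb : 2 ≤ b) (f : Nat)
    (hIH : ∀ m, m ≤ f → valB f m b c = hVal b c m) :
    ∀ n i total, n * b ^ i ≤ b ^ f →
      valLoop f n b c i total = total + hVal b c (n * b ^ i) := by
  intro n
  induction n using Nat.strong_induction_on with
  | _ n ih =>
    intro i total hbound
    by_cases h0 : n = 0
    · rw [valLoop, dif_neg (by omega)]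
      simp [h0, hVal_zero]
    · have hpos : 0 < n := by omega
      have hbpi : 0 < b ^ i := Nat.pow_pos (by omega)
      have hif : i ≤ f := by
        have h1 : b ^ i ≤ n * b ^ i := Nat.le_mul_of_pos_left _ hpos
        have := Nat.pow_le_pow_iff_right (show 1 < b by omega) (n := i) (m := f)
        exact this.mp (by omega)
      have hdiv_lt : n / b < n := Nat.div_lt_self hpos (by omega)
      have hbound' : n / b * b ^ (i + 1) ≤ b ^ f := by
        have : n / b * b ^ (i + 1) = (n / b * b) * b ^ i := by rw [pow_succ]; ring
        have h2 : n / b * b ≤ n := Nat.div_mul_le_self n b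
        nlinarith
      have hsplit : n * b ^ i = n / b * b ^ (i + 1) + n % b * b ^ i := by
        calc n * b ^ i = (b * (n / b) + n % b) * b ^ i := by rw [Nat.div_add_mod]
        _ = n / b * (b * b ^ i) + n % b * b ^ i := by ring
        _ = _ := by rw [← pow_succ']
      have hlow : n % b * b ^ i < b ^ (i + 1) := by
        have : n % b < b := Nat.mod_lt _ (by omega)
        rw [pow_succ, mul_comm (b ^ i) b]; nlinarith
      have hkey : hVal b c (n * b ^ i) =
          n % b * c ^ hVal b c i + hVal b c (n / b * b ^ (i + 1)) := by
        rw [hsplit, hVal_split b c hb (n / b) (i + 1) _ hlow,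
          hVal_digit b c hb (n % b) i (Nat.mod_lt _ (by omega))]
        ring
      rw [valLoop, dif_pos ⟨hb, hpos⟩]
      rw [ih (n / b) hdiv_lt (i + 1) _ hbound']
      by_cases hd : n % b = 0
      · rw [if_pos hd, hkey, hd]; ring
      · rw [if_neg hd, hIH i hif, hkey]; ring

-- B's helper computes hVal (with enough fuel)
theorem valB_ok (b c : Nat) (hb : 2 ≤ b) :
    ∀ fuel n, n ≤ fuel → valB fuel n b c = hVal b c n := by
  intro fuel
  induction fuel with
  | zero =>
    intro n hn
    have : n = 0 := by omega
    simp [this, valB, hVal_zero]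
  | succ f ih =>
    intro n hn
    have hb2 : (2:Nat) ≤ b := hb
    have hnf : n ≤ b ^ f := by
      have h1 : f < 2 ^ f := Nat.lt_two_pow_self
      have h2 : 2 ^ f ≤ b ^ f := Nat.pow_le_pow_left hb _
      omega
    rw [valB, valLoop_eq b c hb f ih n 0 0 (by simpa using hnf)]
    simp

-- the two main loops produce start's tail identically
theorem gsLoops_eq (r : Nat) : ∀ (current : Int) (b : Nat) (seq : List Int) (tail : List Int),
    2 ≤ b → gsLoopA r current b (seq ++ tail) = seq ++ gsLoopB r current b tail := by
  induction r with
  | zero => intro current b seq tail _; rfl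
  | succ r ih =>
    intro current b seq tail hb
    rw [gsLoopA, gsLoopB]
    by_cases hc : current > 0
    · simp only [if_pos hc]
      have heq : evalH (toHB current.toNat current.toNat b) (b + 1) =
          valB current.toNat current.toNat b (b + 1) := by
        rw [eval_toHB b (b + 1) hb _ _ (le_refl _), valB_ok b (b + 1) hb _ _ (le_refl _)]
      rw [heq, List.append_assoc]
      exact ih _ (b + 1) seq _ (by omega)
    · simp [if_neg hc]

-- ===== VERDICT (by name: the statement is the Claim_ definition above) =====
theorem goodstein_sequence_spec : Claim_equal_goodstein_sequence := by
  intro start max_terms _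
  unfold Spec_goodstein_sequence goodstein_sequence goodstein_sequence_alt
  by_cases h : start = 0
  · simp [h]
  · simp only [if_neg h]
    have := gsLoops_eq (max_terms - 1).toNat start 2 [start] [] (by omega)
    simpa using this
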